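-- pv_equiv track=rewrite | github.com/kimkoech/shiftboard_handler | browser_handler.py | find_sharing_shifts
-- ===== SOURCE A (Python) =====
-- def find_sharing_shifts(num_list):
--     timeindices = []
--     i = 0
--     for x, y in zip(num_list, num_list[1:]):
--         plus_one_mode_of_x = (x + 1) % 10
--         if plus_one_mode_of_x == y:
--             timeindices.append(i)
--         else:
--             i += 1
--     return timeindices
-- ===== SOURCE B (Python) =====
-- def find_sharing_shifts(num_list):
--     matches = [(x + 1) % 10 == y for x, y in zip(num_list, num_list[1:])]
--     prefix_before = []
--     acc = 0
--     for m in matches: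
--         prefix_before.append(acc)
--         if not m:
--             acc += 1
--     return [p for p, m in zip(prefix_before, matches) if m]
-- ===== Notes on version B (the rewrite author's own statement) =====
-- stated objective: alternative
-- what changed: Replaces the single interleaved counter loop with two passes: first a table of adjacent-pair match flags plus an exclusive prefix table of mismatch counts, then a filtered emission of the prefix counts at matching positions.
import Mathlib
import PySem

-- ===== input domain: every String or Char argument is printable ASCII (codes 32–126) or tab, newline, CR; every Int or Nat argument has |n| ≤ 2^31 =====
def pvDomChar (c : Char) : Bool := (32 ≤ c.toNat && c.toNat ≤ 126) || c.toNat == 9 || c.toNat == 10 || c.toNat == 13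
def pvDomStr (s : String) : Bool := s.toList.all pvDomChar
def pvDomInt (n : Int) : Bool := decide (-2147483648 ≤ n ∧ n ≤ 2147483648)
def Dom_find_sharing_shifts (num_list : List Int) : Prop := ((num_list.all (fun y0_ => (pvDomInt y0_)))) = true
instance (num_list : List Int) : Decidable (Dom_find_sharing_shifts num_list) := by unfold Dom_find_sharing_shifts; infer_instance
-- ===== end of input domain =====

-- B replaces A's single interleaved counter loop by a match-flag table, an exclusive
-- prefix table of mismatch counts, and a filtered emission pass (alternative decomposition).


-- ===== PORT A =====
-- A's loop over zip(num_list, num_list[1:]) with state (timeindices, i).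
def pvLoopA : List (Int × Int) → List Int → Int → List Int
  | [], timeindices, _ => timeindices
  | (x, y) :: rest, timeindices, i =>
    if PySem.Int.mod (x + 1) 10 == y then
      pvLoopA rest (timeindices ++ [i]) i
    else
      pvLoopA rest timeindices (i + 1)

def find_sharing_shifts (num_list : List Int) : List Int :=
  pvLoopA (num_list.zip (num_list.drop 1)) [] 0

-- ===== PORT B =====
-- exclusive prefix table of mismatch counts over the flag list
def pvPrefix : List Bool → Int → List Int
  | [], _ => []
  | m :: ms, acc => acc :: pvPrefix ms (acc + (if m then 0 else 1))

def find_sharing_shifts_alt (num_list : List Int) : List Int :=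
  let flags := (num_list.zip (num_list.drop 1)).map
    (fun p => PySem.Int.mod (p.1 + 1) 10 == p.2)
  let prefix_before := pvPrefix flags 0
  ((prefix_before.zip flags).filter (fun q => q.2)).map (fun q => q.1)

-- ===== PRECONDITION & SPEC =====
def Spec_find_sharing_shifts (num_list : List Int) (out : List Int) : Prop := out = find_sharing_shifts_alt num_list
instance (num_list : List Int) (out : List Int) : Decidable (Spec_find_sharing_shifts num_list out) := by unfold Spec_find_sharing_shifts; infer_instance

-- ===== CLAIM (what is proved, stated in full; the proofs are below) =====
def Claim_equal_find_sharing_shifts : Prop := ∀ (num_list : List Int), Dom_find_sharing_shifts num_list → Spec_find_sharing_shifts num_list (find_sharing_shifts num_list)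

-- ===== LEMMAS AND PROOFS =====
-- B's emission pass, abbreviated for the invariant
def pvEmit (flags : List Bool) (i : Int) : List Int :=
  (((pvPrefix flags i).zip flags).filter (fun q => q.2)).map (fun q => q.1)

theorem pvLoopA_emit (pairs : List (Int × Int)) (ti : List Int) (i : Int) :
    pvLoopA pairs ti i =
      ti ++ pvEmit (pairs.map (fun p => PySem.Int.mod (p.1 + 1) 10 == p.2)) i := by
  induction pairs generalizing ti i with
  | nil => simp [pvLoopA, pvEmit, pvPrefix]
  | cons hd tl ih =>
    obtain ⟨x, y⟩ := hd
    simp only [pvLoopA, List.map_cons, pvEmit, pvPrefix, List.zip_cons_cons,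
      List.filter_cons, ih]
    split_ifs with h
    · simp
    · simp

-- ===== VERDICT (by name: the statement is the Claim_ definition above) =====
theorem find_sharing_shifts_spec : Claim_equal_find_sharing_shifts := by
  intro num_list _
  unfold Spec_find_sharing_shifts find_sharing_shifts find_sharing_shifts_alt
  rw [pvLoopA_emit]
  simp [pvEmit]
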